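-- pv_equiv track=rewrite | github.com/NightmareWaifu/coding-practice | codewars.py | numbers_of_letters_data
-- ===== SOURCE A (Python) =====
-- def numbers_of_letters_data(n, path):
--     numbers_letters = ["zero","one","two","three","four","five","six","seven","eight","nine"]
--     letters = ""
--     for num in str(n):
--         letters = letters + numbers_letters[int(num)]
--
--     path.append(letters)
--     if n == len(letters):
--         return path
--
--     letter_value = len(letters)
--
--     return numbers_of_letters_data(letter_value, path)
-- ===== SOURCE B (Python) =====
-- def numbers_of_letters_data(n, path):
--     words = ["zero", "one", "two", "three", "four", "five", "six", "seven", "eight", "nine"]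
--     m = n
--     while True:
--         if m == 0:
--             letters = words[0]
--         else:
--             parts = []
--             k = m
--             while k > 0:
--                 parts.append(words[k % 10])
--                 k //= 10
--             letters = "".join(reversed(parts))
--         path.append(letters)
--         if m == len(letters):
--             return path
--         m = len(letters)
-- ===== Notes on version B (the rewrite author's own statement) =====
-- stated objective: alternative
-- what changed: Replaces the tail recursion with an iterative while loop over the current value, and spells a number by arithmetic digit extraction (k % 10, k //= 10, join reversed parts) instead of str(n) with list indexing per character.
-- outside the precondition, e.g. on numbers_of_letters_data(-3, []): A raises ValueError, B returns ['', 'zero', 'four']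
import Mathlib
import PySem

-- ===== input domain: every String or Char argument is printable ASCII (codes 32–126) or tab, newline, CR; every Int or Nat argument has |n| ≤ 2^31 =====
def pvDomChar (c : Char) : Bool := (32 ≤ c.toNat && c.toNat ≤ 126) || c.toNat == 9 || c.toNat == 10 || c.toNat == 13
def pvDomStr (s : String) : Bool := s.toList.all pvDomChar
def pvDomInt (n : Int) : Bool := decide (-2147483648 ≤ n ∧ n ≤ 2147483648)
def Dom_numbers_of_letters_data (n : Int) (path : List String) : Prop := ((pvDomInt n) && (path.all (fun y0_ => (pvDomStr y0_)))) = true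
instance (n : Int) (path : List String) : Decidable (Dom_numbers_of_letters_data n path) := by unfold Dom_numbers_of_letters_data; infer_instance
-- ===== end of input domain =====

-- B replaces A's tail recursion by a while loop and spells a number by arithmetic digit
-- extraction (k % 10, k //= 10) instead of iterating over str(n); same return value on
-- 0 ≤ n (objective: alternative).  Both A and B mutate `path` in place in Python and
-- return it; the equivalence proved here is about the returned list of strings.

-- ===== PORT A =====
def pvWordsA : List String :=
  ["zero", "one", "two", "three", "four", "five", "six", "seven", "eight", "nine"]

-- letters = ""; for num in str(n): letters = letters + numbers_letters[int(num)]
-- (none = ValueError from int(num), reached exactly when n < 0)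
def pvSpellA (n : Int) : Option (List Char) :=
  (PySem.Int.toChars n).foldl
    (fun acc c =>
      acc.bind (fun s =>
        ((PySem.Int.ofChars? [c]).bind (fun i => PySem.List.pyGet? pvWordsA i)).map
          (fun w => s ++ w.toList)))
    (some [])

-- the tail recursion of A, with a fuel guard for totality only (64 is never exhausted on Dom)
def pvLoopA : Nat → Int → List String → List String
  | 0, _, path => path
  | fuel + 1, n, path =>
    match pvSpellA n with
    | none => path
    | some letters =>
      let path' := path ++ [String.ofList letters]
      if n = (letters.length : Int) then path'
      else pvLoopA fuel (letters.length : Int) path'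

def numbers_of_letters_data (n : Int) (path : List String) : List String :=
  pvLoopA 64 n path

-- ===== PORT B =====
def pvWordsB : List String :=
  ["zero", "one", "two", "three", "four", "five", "six", "seven", "eight", "nine"]

-- while k > 0: parts.append(words[k % 10]); k //= 10   (fuel guard for totality only)
def pvPartsB : Nat → Int → List String → List String
  | 0, _, parts => parts
  | fuel + 1, k, parts =>
    if 0 < k then
      pvPartsB fuel (PySem.Int.floordiv k 10)
        (parts ++ [PySem.List.pyGetD pvWordsB (PySem.Int.mod k 10) ""])
    else parts

-- letters = words[0] if m == 0 else "".join(reversed(parts))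
def pvSpellB (m : Int) : List Char :=
  if m = 0 then (PySem.List.pyGetD pvWordsB 0 "").toList
  else (PySem.Str.join "" (pvPartsB 64 m []).reverse).toList

-- the while True loop of B (fuel guard for totality only, never exhausted on Dom)
def pvLoopB : Nat → Int → List String → List String
  | 0, _, path => path
  | fuel + 1, m, path =>
    let letters := pvSpellB m
    let path' := path ++ [String.ofList letters]
    if m = (letters.length : Int) then path'
    else pvLoopB fuel (letters.length : Int) path'

def numbers_of_letters_data_alt (n : Int) (path : List String) : List String :=
  pvLoopB 64 n path

-- ===== PRECONDITION & SPEC =====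
-- Pre_ excludes n < 0, on which A raises ValueError: str(n) starts with '-' and int('-') fails.
def Pre_numbers_of_letters_data (n : Int) (path : List String) : Prop := 0 ≤ n
instance (n : Int) (path : List String) : Decidable (Pre_numbers_of_letters_data n path) := by
  unfold Pre_numbers_of_letters_data; infer_instance

def pvWitness_numbers_of_letters_data : Int × List String := (1, [])

def Spec_numbers_of_letters_data (n : Int) (path : List String) (out : List String) : Prop :=
  out = numbers_of_letters_data_alt n path
instance (n : Int) (path : List String) (out : List String) :
    Decidable (Spec_numbers_of_letters_data n path out) := by
  unfold Spec_numbers_of_letters_data; infer_instance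

-- ===== CLAIM (what is proved, stated in full; the proofs are below) =====
def Claim_equal_numbers_of_letters_data : Prop :=
  ∀ (n : Int) (path : List String), Dom_numbers_of_letters_data n path →
    Pre_numbers_of_letters_data n path →
    Spec_numbers_of_letters_data n path (numbers_of_letters_data n path)

-- ===== LEMMAS AND PROOFS =====

-- the list of digit words of m, most significant first (shared characterisation of both spellers)
def pvWordsList : Nat → List String
  | m =>
    if _h : m < 10 then [pvWordsA.getD m ""]
    else pvWordsList (m / 10) ++ [pvWordsA.getD (m % 10) ""]
  decreasing_by exact Nat.div_lt_self (by omega) (by omega)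

def pvWordChars (m : Nat) : List Char := ((pvWordsList m).map String.toList).flatten

-- the decimal digit characters of m, most significant first
def pvDChars : Nat → List Char
  | m =>
    if _h : m < 10 then [Nat.digitChar m]
    else pvDChars (m / 10) ++ [Nat.digitChar (m % 10)]
  decreasing_by exact Nat.div_lt_self (by omega) (by omega)

theorem pvToDigitsCore_eq (f : Nat) :
    ∀ (m : Nat) (acc : List Char), m < 10 ^ (f + 1) →
      Nat.toDigitsCore 10 (f + 1) m acc = pvDChars m ++ acc := by
  induction f with
  | zero =>
    intro m acc hm
    rw [pvDChars]
    have h10 : m < 10 := by simpa using hm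
    simp [Nat.toDigitsCore, Nat.div_eq_of_lt h10, Nat.mod_eq_of_lt h10, h10]
  | succ f ih =>
    intro m acc hm
    rw [pvDChars]
    by_cases h10 : m < 10
    · simp [Nat.toDigitsCore, Nat.div_eq_of_lt h10, Nat.mod_eq_of_lt h10, h10]
    · have hdiv : m / 10 ≠ 0 := by omega
      have hlt : m / 10 < 10 ^ (f + 1) := by
        rw [Nat.div_lt_iff_lt_mul (by norm_num)]
        calc m < 10 ^ (f + 1 + 1) := hm
          _ = 10 ^ (f + 1) * 10 := by ring
      rw [dif_neg h10]
      have hunf : Nat.toDigitsCore 10 (f + 1 + 1) m acc =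
          Nat.toDigitsCore 10 (f + 1) (m / 10) ((m % 10).digitChar :: acc) := by
        simp [Nat.toDigitsCore, hdiv]
      rw [hunf, ih (m / 10) _ hlt]
      simp

theorem pvToDigits_eq (m : Nat) : Nat.toDigits 10 m = pvDChars m := by
  have hm : m < 10 ^ (m + 1) := by
    calc m < 10 ^ m := Nat.lt_pow_self (by norm_num)
      _ ≤ 10 ^ (m + 1) := Nat.pow_le_pow_right (by norm_num) (by omega)
  simpa using pvToDigitsCore_eq m m [] hm

theorem pvSpellA_fold (m : Nat) : ∀ (acc : List Char),
    (pvDChars m).foldl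
      (fun acc c =>
        acc.bind (fun s =>
          ((PySem.Int.ofChars? [c]).bind (fun i => PySem.List.pyGet? pvWordsA i)).map
            (fun w => s ++ w.toList)))
      (some acc) = some (acc ++ pvWordChars m) := by
  induction m using Nat.strong_induction_on with
  | _ m ih =>
    intro acc
    rw [pvDChars]
    by_cases h10 : m < 10
    · have h1 : PySem.Int.ofChars? [Nat.digitChar m] = some (m : Int) := by
        interval_cases m <;> decide
      have h2 : PySem.List.pyGet? pvWordsA (m : Int) = some (pvWordsA.getD m "") := by
        interval_cases m <;> decide
      simp [h10, h1, h2, pvWordChars, pvWordsList]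
    · have hrlt : m % 10 < 10 := Nat.mod_lt _ (by norm_num)
      have h1 : PySem.Int.ofChars? [Nat.digitChar (m % 10)] = some ((m % 10 : Nat) : Int) := by
        set r := m % 10 with hr
        interval_cases r <;> decide
      have h2 : PySem.List.pyGet? pvWordsA ((m % 10 : Nat) : Int) =
          some (pvWordsA.getD (m % 10) "") := by
        set r := m % 10 with hr
        interval_cases r <;> decide
      have hdm : m / 10 < m := Nat.div_lt_self (by omega) (by omega)
      simp only [h10, dif_neg, not_false_iff, List.foldl_append]
      rw [ih (m / 10) hdm acc]
      simp only [List.foldl_cons, List.foldl_nil, Option.bind_some, h1, h2, Option.map_some]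
      have : pvWordChars m = pvWordChars (m / 10) ++ (pvWordsA.getD (m % 10) "").toList := by
        unfold pvWordChars
        conv_lhs => rw [pvWordsList]
        simp [h10]
      rw [this]
      simp

theorem pvSpellA_eq (n : Int) (hn : 0 ≤ n) :
    pvSpellA n = some (pvWordChars n.toNat) := by
  unfold pvSpellA
  have : PySem.Int.toChars n = Nat.toDigits 10 n.toNat := by
    unfold PySem.Int.toChars
    rw [if_neg (by omega)]
  rw [this, pvToDigits_eq]
  simpa using pvSpellA_fold n.toNat []

theorem pvPartsB_zero (f : Nat) (parts : List String) : pvPartsB f 0 parts = parts := by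
  cases f <;> simp [pvPartsB]

theorem pvPartsB_eq (f : Nat) : ∀ (k : Nat) (parts : List String), 0 < k → k < 10 ^ f →
    pvPartsB f (k : Int) parts = parts ++ (pvWordsList k).reverse := by
  induction f with
  | zero => intro k parts hk hf; omega
  | succ f ih =>
    intro k parts hk hf
    have hpos : (0 : Int) < (k : Int) := by exact_mod_cast hk
    have hdiv : PySem.Int.floordiv (k : Int) 10 = ((k / 10 : Nat) : Int) := by
      exact_mod_cast PySem.Int.floordiv_natCast k 10
    have hmod : PySem.Int.mod (k : Int) 10 = ((k % 10 : Nat) : Int) := by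
      exact_mod_cast PySem.Int.mod_natCast k 10
    have hget : PySem.List.pyGetD pvWordsB ((k % 10 : Nat) : Int) "" = pvWordsB.getD (k % 10) "" :=
      PySem.List.pyGetD_natCast pvWordsB (k % 10) ""
    simp only [pvPartsB, hpos, if_pos, hdiv, hmod, hget]
    by_cases h10 : k < 10
    · have : k / 10 = 0 := Nat.div_eq_of_lt h10
      rw [this]
      simp only [Nat.cast_zero, pvPartsB_zero]
      conv_rhs => rw [pvWordsList]
      simp [h10, Nat.mod_eq_of_lt h10, pvWordsB, pvWordsA]
    · have hklt : k / 10 < 10 ^ f := by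
        rw [Nat.div_lt_iff_lt_mul (by norm_num)]
        calc k < 10 ^ (f + 1) := hf
          _ = 10 ^ f * 10 := by ring
      rw [ih (k / 10) _ (by omega) hklt]
      conv_rhs => rw [pvWordsList]
      simp [h10, pvWordsB, pvWordsA]

theorem pvJoin_empty (ls : List (List Char)) : PySem.Chars.join [] ls = ls.flatten := by
  induction ls with
  | nil => simp [PySem.Chars.join_nil]
  | cons p rest ih =>
    cases rest with
    | nil => simp [PySem.Chars.join_singleton]
    | cons q t => rw [PySem.Chars.join_cons_cons]; simp_all

theorem pvSpellB_eq (m : Nat) (hm : m < 10 ^ 64) :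
    pvSpellB (m : Int) = pvWordChars m := by
  unfold pvSpellB
  by_cases h0 : m = 0
  · subst h0
    norm_num
    rw [pvWordChars, pvWordsList]
    decide
  · have hz : ((m : Int) = 0) = False := by simp [h0]
    rw [if_neg (by exact_mod_cast h0)]
    rw [pvPartsB_eq 64 m [] (by omega) hm]
    rw [List.nil_append, List.reverse_reverse]
    rw [PySem.Str.toList_join, show ("" : String).toList = [] from rfl, pvJoin_empty]
    rfl

theorem pvWordChars_len (f : Nat) : ∀ (m : Nat), m < 10 ^ f →
    (pvWordChars m).length ≤ 5 * f + 5 := by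
  induction f with
  | zero =>
    intro m hm
    have : m = 0 := by omega
    subst this
    rw [pvWordChars, pvWordsList]
    decide
  | succ f ih =>
    intro m hm
    by_cases h10 : m < 10
    · have : (pvWordChars m).length ≤ 5 := by
        rw [pvWordChars, pvWordsList]
        simp only [h10, dif_pos]
        interval_cases m <;> decide
      omega
    · have hklt : m / 10 < 10 ^ f := by
        rw [Nat.div_lt_iff_lt_mul (by norm_num)]
        calc m < 10 ^ (f + 1) := hm
          _ = 10 ^ f * 10 := by ring
      have hrec := ih (m / 10) hklt
      have hw : (pvWordsA.getD (m % 10) "").toList.length ≤ 5 := by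
        have : m % 10 < 10 := Nat.mod_lt _ (by norm_num)
        set r := m % 10 with hr
        interval_cases r <;> decide
      have : pvWordChars m = pvWordChars (m / 10) ++ (pvWordsA.getD (m % 10) "").toList := by
        unfold pvWordChars
        conv_lhs => rw [pvWordsList]
        simp [h10]
      rw [this]
      simp only [List.length_append]
      omega

theorem pvLoop_eq (f : Nat) : ∀ (n : Int) (path : List String),
    0 ≤ n → n < 10 ^ 64 → pvLoopA f n path = pvLoopB f n path := by
  induction f with
  | zero => intro n path _ _; rfl
  | succ f ih =>
    intro n path hn hlt
    obtain ⟨m, rfl⟩ : ∃ m : Nat, n = (m : Int) := ⟨n.toNat, (Int.toNat_of_nonneg hn).symm⟩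
    have hmlt : m < 10 ^ 64 := by exact_mod_cast hlt
    have hA := pvSpellA_eq (m : Int) hn
    have hB := pvSpellB_eq m hmlt
    simp only [Int.toNat_natCast] at hA
    simp only [pvLoopA, pvLoopB, hA, hB]
    by_cases heq : (m : Int) = ((pvWordChars m).length : Int)
    · simp [heq]
    · simp only [heq, if_neg, not_false_iff]
      apply ih
      · exact_mod_cast Nat.zero_le _
      · have hlen : (pvWordChars m).length ≤ 5 * 64 + 5 := pvWordChars_len 64 m hmlt
        calc ((pvWordChars m).length : Int) ≤ ((5 * 64 + 5 : Nat) : Int) := by exact_mod_cast hlen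
          _ < 10 ^ 64 := by norm_num

-- ===== VERDICT (by name: the statement is the Claim_ definition above) =====
theorem numbers_of_letters_data_spec : Claim_equal_numbers_of_letters_data := by
  intro n path hDom hPre
  unfold Spec_numbers_of_letters_data numbers_of_letters_data numbers_of_letters_data_alt
  have hn : 0 ≤ n := hPre
  have hbound : n < 10 ^ 64 := by
    unfold Dom_numbers_of_letters_data pvDomInt at hDom
    simp only [Bool.and_eq_true, decide_eq_true_eq] at hDom
    calc n ≤ 2147483648 := hDom.1.2
      _ < 10 ^ 64 := by norm_num
  exact pvLoop_eq 64 n path hn hbound
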